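-- pv_equiv track=rewrite | github.com/MdShaurov/MdShaurov.github.io | cs20-practice-problems/Qwerty Finder Practice.py | qwerty_finder
-- ===== SOURCE A (Python) =====
-- def qwerty_finder(word):
--     new_word = ""
--     letters = "qwertyQWERTY"
--     for i in range(len(word)):
--         new_word += word[i]
--         for x in new_word:
--             if x in letters:
--                 return len(new_word) - 1
--     return -1
-- ===== SOURCE B (Python) =====
-- def qwerty_finder(word):
--     positions = [p for p in (word.find(c) for c in "qwertyQWERTY") if p >= 0]
--     return min(positions) if positions else -1
-- ===== Notes on version B (the rewrite author's own statement) =====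
-- stated objective: idiomatic
-- what changed: Instead of A's quadratic index loop that rebuilds and rescans a growing prefix string, B computes word.find(c) once for each of the 12 qwerty-row letters and returns the minimum non-negative position, or -1 if none is found.
import Mathlib
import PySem

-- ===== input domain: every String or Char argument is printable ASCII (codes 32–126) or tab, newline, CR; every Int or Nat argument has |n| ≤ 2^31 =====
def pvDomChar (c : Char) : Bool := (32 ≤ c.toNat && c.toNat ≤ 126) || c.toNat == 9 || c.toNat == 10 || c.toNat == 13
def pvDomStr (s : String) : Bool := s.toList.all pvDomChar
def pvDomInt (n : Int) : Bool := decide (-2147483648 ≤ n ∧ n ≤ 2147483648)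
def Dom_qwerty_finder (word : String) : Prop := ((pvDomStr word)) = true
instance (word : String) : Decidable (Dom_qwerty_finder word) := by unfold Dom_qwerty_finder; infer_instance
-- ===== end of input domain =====

-- B replaces A's index loop (which rebuilds and rescans a growing prefix string) by one
-- find per qwerty letter followed by a min over the non-negative positions (idiomatic).

-- ===== PORT A =====
-- inner loop: 'for x in new_word: if x in letters: return …' — reports whether it returns
def qwertyInner (letters : List Char) : List Char → Bool
  | [] => false
  | x :: xs => if x ∈ letters then true else qwertyInner letters xs

-- outer loop over 'for i in range(len(word))', carrying new_word
def qwertyLoop (chars letters new_word : List Char) : List Int → Int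
  | [] => -1
  | i :: rest =>
    match PySem.List.pyGet? chars i with
    | none => -1  -- totalization guard only: i is drawn from range(len(chars)), always in range
    | some ch =>
      let nw := new_word ++ [ch]
      if qwertyInner letters nw then (nw.length : Int) - 1
      else qwertyLoop chars letters nw rest

def qwerty_finder (word : String) : Int :=
  qwertyLoop word.toList "qwertyQWERTY".toList []
    (PySem.List.pyRange 0 (word.toList.length : Int) 1)

-- ===== PORT B =====
def qwerty_finder_alt (word : String) : Int :=
  let positions :=
    (("qwertyQWERTY".toList).map (fun c => PySem.Str.find word (String.ofList [c]))).filter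
      (fun p => decide (0 ≤ p))
  match PySem.List.min? positions (fun x => x) with
  | some m => m
  | none => -1

-- ===== PRECONDITION & SPEC =====
def Spec_qwerty_finder (word : String) (out : Int) : Prop := out = qwerty_finder_alt word
instance (word : String) (out : Int) : Decidable (Spec_qwerty_finder word out) := by unfold Spec_qwerty_finder; infer_instance

-- ===== CLAIM (what is proved, stated in full; the proofs are below) =====
def Claim_equal_qwerty_finder : Prop := ∀ (word : String), Dom_qwerty_finder word → Spec_qwerty_finder word (qwerty_finder word)

-- ===== LEMMAS AND PROOFS =====

-- common specification: index of the first char of s that lies in L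
def fq (L : List Char) : List Char → Option Nat
  | [] => none
  | c :: s => if c ∈ L then some 0 else (fq L s).map (· + 1)

lemma fq_eq_none_iff (L s : List Char) : fq L s = none ↔ ∀ c ∈ s, c ∉ L := by
  induction s with
  | nil => simp [fq]
  | cons c s ih =>
    by_cases hc : c ∈ L <;> simp [fq, hc, ih]

lemma fq_spec (L s : List Char) (n : Nat) (h : fq L s = some n) :
    ∃ c, s[n]? = some c ∧ c ∈ L ∧ ∀ k < n, ∀ c', s[k]? = some c' → c' ∉ L := by
  induction s generalizing n with
  | nil => simp [fq] at h
  | cons c s ih =>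
    by_cases hc : c ∈ L
    · simp [fq, hc] at h; subst h
      exact ⟨c, by simp, hc, by omega⟩
    · simp [fq, hc] at h
      obtain ⟨m, hm, rfl⟩ := h
      obtain ⟨c', hg, hcL, hmin⟩ := ih m hm
      refine ⟨c', by simpa using hg, hcL, ?_⟩
      intro k hk c'' hk'
      cases k with
      | zero => simp at hk'; subst hk'; exact hc
      | succ k => exact hmin k (by omega) c'' (by simpa using hk')

lemma fq_min (L s : List Char) (k : Nat) (c : Char) (hk : s[k]? = some c) (hc : c ∈ L) :
    ∃ n, fq L s = some n ∧ n ≤ k := by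
  induction s generalizing k with
  | nil => simp at hk
  | cons d s ih =>
    by_cases hd : d ∈ L
    · exact ⟨0, by simp [fq, hd], by omega⟩
    · cases k with
      | zero => simp at hk; subst hk; exact absurd hc hd
      | succ k =>
        obtain ⟨n, hn, hle⟩ := ih k (by simpa using hk)
        exact ⟨n + 1, by simp [fq, hd, hn], by omega⟩

lemma singleton_prefix_iff (t : List Char) (c : Char) : [c] <+: t ↔ t.head? = some c := by
  cases t with
  | nil => simp
  | cons x xs => simp [List.cons_prefix_cons, eq_comm]

lemma singleton_prefix_drop (s : List Char) (c : Char) (k : Nat) :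
    [c] <+: s.drop k ↔ s[k]? = some c := by
  rw [singleton_prefix_iff, List.head?_drop]

-- A-side: the inner scan of new_word ++ [c] fires exactly on c when new_word is clean
lemma inner_eq (L p : List Char) (c : Char) (hp : ∀ x ∈ p, x ∉ L) :
    qwertyInner L (p ++ [c]) = decide (c ∈ L) := by
  induction p with
  | nil => by_cases hc : c ∈ L <;> simp [qwertyInner, hc]
  | cons x p ih =>
    have hx : x ∉ L := hp x (by simp)
    simp only [List.cons_append, qwertyInner, if_neg hx]
    exact ih (fun y hy => hp y (by simp [hy]))

lemma loop_eq (L : List Char) (rem : List Char) : ∀ p : List Char, (∀ x ∈ p, x ∉ L) →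
    qwertyLoop (p ++ rem) L p
      (PySem.List.pyRange (p.length : Int) (((p ++ rem).length : Nat) : Int) 1) =
    (fq L rem).elim (-1) (fun n => ((p.length + n : Nat) : Int)) := by
  induction rem with
  | nil =>
    intro p hp
    rw [PySem.List.pyRange_one_eq_nil (by simp)]
    simp [qwertyLoop, fq]
  | cons c rem ih =>
    intro p hp
    have hlt : (p.length : Int) < (((p ++ c :: rem).length : Nat) : Int) := by
      simp
    rw [PySem.List.pyRange_one_cons hlt]
    have hget : PySem.List.pyGet? (p ++ c :: rem) (p.length : Int) = some c := by
      rw [PySem.List.pyGet?_natCast]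
      simp
    simp only [qwertyLoop, hget]
    rw [inner_eq L p c hp]
    by_cases hc : c ∈ L
    · simp [fq, hc]
    · rw [if_neg (by simp [hc])]
      have hp' : ∀ x ∈ p ++ [c], x ∉ L := by
        intro x hx
        rcases List.mem_append.1 hx with h | h
        · exact hp x h
        · simp at h; subst h; exact hc
      have hlen : ((p.length : Int) + 1) = (((p ++ [c]).length : Nat) : Int) := by simp
      have hassoc : p ++ c :: rem = (p ++ [c]) ++ rem := by simp
      rw [hlen, hassoc, ih (p ++ [c]) hp']
      cases hfq : fq L rem with
      | none => simp [fq, hc, hfq]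
      | some k => simp [fq, hc, hfq]; omega

lemma a_eq_fq (word : String) :
    qwerty_finder word =
      (fq "qwertyQWERTY".toList word.toList).elim (-1) (fun n => (n : Int)) := by
  have := loop_eq "qwertyQWERTY".toList word.toList [] (by simp)
  simpa [qwerty_finder] using this

-- B-side
lemma b_eq_fq (word : String) :
    qwerty_finder_alt word =
      (fq "qwertyQWERTY".toList word.toList).elim (-1) (fun n => (n : Int)) := by
  set L := "qwertyQWERTY".toList with hL
  set s := word.toList with hs
  have hfind : ∀ c : Char, PySem.Str.find word (String.ofList [c]) = PySem.Chars.find s [c] := by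
    intro c; rw [PySem.Str.find_eq]; simp only [String.toList_ofList]; rw [← hs]
  unfold qwerty_finder_alt
  simp only [← hL, hfind]
  set positions := (L.map (fun c => PySem.Chars.find s [c])).filter (fun p => decide (0 ≤ p))
    with hpos
  cases hfq : fq L s with
  | none =>
    have hnone : ∀ c ∈ s, c ∉ L := (fq_eq_none_iff L s).1 hfq
    have hempty : positions = [] := by
      rw [hpos, List.filter_eq_nil_iff]
      intro p hp
      obtain ⟨c, hcL, rfl⟩ := List.mem_map.1 hp
      simp only [decide_eq_true_eq]
      intro h0
      have hinf : [c] <:+: s := (PySem.Chars.find_nonneg_iff s [c]).1 h0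
      exact hnone c ((List.singleton_infix_iff c s).1 hinf) hcL
    simp [hempty, PySem.List.min?]
  | some n =>
    obtain ⟨c0, hg0, hc0L, hmin⟩ := fq_spec L s n hfq
    -- the find for c0 is in positions and ≤ n
    have hpre0 : [c0] <+: s.drop n := (singleton_prefix_drop s c0 n).2 hg0
    have hinf0 : [c0] <:+: s := hpre0.isInfix.trans (List.drop_suffix n s).isInfix
    have hf0 : 0 ≤ PySem.Chars.find s [c0] := (PySem.Chars.find_nonneg_iff s [c0]).2 hinf0
    have hf0mem : PySem.Chars.find s [c0] ∈ positions := by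
      rw [hpos, List.mem_filter]
      exact ⟨List.mem_map.2 ⟨c0, hc0L, rfl⟩, by simpa using hf0⟩
    have hf0le : PySem.Chars.find s [c0] ≤ (n : Int) := by
      have hsp := (PySem.Chars.find_spec hf0).2
      by_contra h
      have hn_lt : n < (PySem.Chars.find s [c0]).toNat := by omega
      exact hsp n hn_lt hpre0
    cases hmm : PySem.List.min? positions (fun x => x) with
    | none =>
      exact absurd ((PySem.List.min?_eq_none_iff positions _).1 hmm ▸ hf0mem) (by simp)
    | some m =>
      have hm_mem := PySem.List.min?_mem hmm
      have hm_min := PySem.List.min?_isMin hmm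
      rw [hpos, List.mem_filter] at hm_mem
      obtain ⟨hm_map, hm_pos⟩ := hm_mem
      obtain ⟨c1, hc1L, hmeq⟩ := List.mem_map.1 hm_map
      have hm0 : 0 ≤ m := by simpa using hm_pos
      -- m points at an occurrence of a letter, so n ≤ m
      have hm_find : 0 ≤ PySem.Chars.find s [c1] := hmeq ▸ hm0
      have hpre1 := (PySem.Chars.find_spec hm_find).1
      have hg1 : s[(PySem.Chars.find s [c1]).toNat]? = some c1 :=
        (singleton_prefix_drop s c1 _).1 hpre1
      obtain ⟨n', hn', hle'⟩ := fq_min L s _ c1 hg1 hc1L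
      have hnn' : n = n' := by rw [hfq] at hn'; injection hn'
      have hnm : (n : Int) ≤ m := by
        omega
      have hmle : m ≤ (n : Int) := le_trans (hm_min _ hf0mem) hf0le
      simp only [Option.elim]
      omega

-- ===== VERDICT (by name: the statement is the Claim_ definition above) =====
theorem qwerty_finder_spec : Claim_equal_qwerty_finder := by
  intro word _
  unfold Spec_qwerty_finder
  rw [a_eq_fq, b_eq_fq]
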